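-- pv_equiv track=rewrite | github.com/Amneet47/codewars-amneet47 | 7kyu/uglify_word.py | uglify_word
-- ===== SOURCE A (Python) =====
-- def uglify_word(s):
--     flag = True  # Start with uppercase
--     result = []
--
--     for char in s:
--         if char.isalpha():
--             result.append(char.upper() if flag else char.lower())
--             flag = not flag
--         elif char == '-':
--             result.append(char)
--             flag = True
--         elif char == ' ':
--             result.append(char)
--             flag = not flag
--         else:
--             result.append(char)
--             flag = True
--
--     return ''.join(result)
-- ===== SOURCE B (Python) =====
-- def uglify_word(s):
--     # Split s into maximal runs of "toggling" characters (letters and spaces)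
--     # versus single non-toggling characters; case each run by local index parity.
--     out = []
--     i, n = 0, len(s)
--     while i < n:
--         ch = s[i]
--         if ch.isalpha() or ch == ' ':
--             j = i
--             while j < n and (s[j].isalpha() or s[j] == ' '):
--                 j += 1
--             out.append(''.join(
--                 (c.upper() if k % 2 == 0 else c.lower()) if c.isalpha() else c
--                 for k, c in enumerate(s[i:j])))
--             i = j
--         else:
--             out.append(ch)
--             i += 1
--     return ''.join(out)
-- ===== Notes on version B (the rewrite author's own statement) =====
-- stated objective: alternative
-- what changed: B replaces A's single char-by-char loop with a mutable case flag by a run-splitting scan: maximal runs of letters/spaces are cased by local index parity (even=upper, odd=lower, spaces consume a slot), other characters are copied verbatim and act as run boundaries.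
import Mathlib
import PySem

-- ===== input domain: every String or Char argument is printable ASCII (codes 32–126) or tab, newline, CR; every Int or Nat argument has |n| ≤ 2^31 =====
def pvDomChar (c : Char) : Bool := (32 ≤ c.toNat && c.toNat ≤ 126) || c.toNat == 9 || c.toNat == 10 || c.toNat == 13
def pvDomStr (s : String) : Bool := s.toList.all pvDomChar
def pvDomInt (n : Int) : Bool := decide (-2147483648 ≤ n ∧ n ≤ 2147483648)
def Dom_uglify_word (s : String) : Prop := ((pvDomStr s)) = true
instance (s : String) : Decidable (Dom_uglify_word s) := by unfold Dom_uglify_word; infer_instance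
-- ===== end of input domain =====

-- B alternates letter case by run-local index parity within maximal letter/space runs instead of A's mutable flag; same O(n) cost, different decomposition.

-- ===== PORT A =====
-- the loop body of A: state = (flag, result list so far)
def pvStepA (st : Bool × List Char) (c : Char) : Bool × List Char :=
  if PySem.Chars.isalpha c then
    (!st.1, st.2 ++ [if st.1 then PySem.Chars.upperChar c else PySem.Chars.lowerChar c])
  else if c = '-' then (true, st.2 ++ [c])
  else if c = ' ' then (!st.1, st.2 ++ [c])
  else (true, st.2 ++ [c])

def uglify_word (s : String) : String :=
  String.mk (s.toList.foldl pvStepA (true, [])).2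

-- ===== PORT B =====
-- "toggling" characters: letters and spaces
def pvTok (c : Char) : Bool := PySem.Chars.isalpha c || c == ' '

-- the generator over enumerate(run): k = local index
def pvRunMap (k : Nat) : List Char → List Char
  | [] => []
  | c :: cs =>
    (if PySem.Chars.isalpha c then
       (if k % 2 == 0 then PySem.Chars.upperChar c else PySem.Chars.lowerChar c)
     else c) :: pvRunMap (k + 1) cs

-- the outer scan: a maximal toggling run at a time, other chars verbatim
def pvGroups : List Char → List Char
  | [] => []
  | c :: rest =>
    if hTok : pvTok c then
      pvRunMap 0 ((c :: rest).takeWhile pvTok) ++ pvGroups ((c :: rest).dropWhile pvTok)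
    else c :: pvGroups rest
termination_by l => l.length
decreasing_by
  · simp [hTok]
    exact List.length_dropWhile_le _ _
  · simp

def uglify_word_alt (s : String) : String :=
  String.mk (pvGroups s.toList)

-- ===== PRECONDITION & SPEC =====
def Spec_uglify_word (s : String) (out : String) : Prop := out = uglify_word_alt s
instance (s : String) (out : String) : Decidable (Spec_uglify_word s out) := by unfold Spec_uglify_word; infer_instance

-- ===== CLAIM (what is proved, stated in full; the proofs are below) =====
def Claim_equal_uglify_word : Prop := ∀ (s : String), Dom_uglify_word s → Spec_uglify_word s (uglify_word s)

-- ===== LEMMAS AND PROOFS =====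

-- the loop of A as a structural recursion over (input, flag)
def uglyRec : List Char → Bool → List Char
  | [], _ => []
  | c :: rest, flag =>
    if PySem.Chars.isalpha c then
      (if flag then PySem.Chars.upperChar c else PySem.Chars.lowerChar c) :: uglyRec rest (!flag)
    else if c = '-' then c :: uglyRec rest true
    else if c = ' ' then c :: uglyRec rest (!flag)
    else c :: uglyRec rest true

theorem foldA_eq (l : List Char) : ∀ (f : Bool) (acc : List Char),
    (l.foldl pvStepA (f, acc)).2 = acc ++ uglyRec l f := by
  induction l with
  | nil => intro f acc; simp [uglyRec]
  | cons c rest ih =>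
    intro f acc
    simp only [List.foldl_cons, pvStepA, uglyRec]
    split_ifs with h1 h2 h3 <;> simp [ih]

theorem uglyRec_nontok {c : Char} (h : pvTok c = false) (rest : List Char) (f : Bool) :
    uglyRec (c :: rest) f = c :: uglyRec rest true := by
  simp only [pvTok, Bool.or_eq_false_iff, beq_eq_false_iff_ne] at h
  simp only [uglyRec, h.1]
  split_ifs <;> simp_all

theorem run_lemma (cs : List Char) : ∀ (k : Nat) (rest : List Char),
    (∀ x ∈ cs, pvTok x = true) →
    (match rest with | [] => True | d :: _ => pvTok d = false) →
    uglyRec (cs ++ rest) (k % 2 == 0) = pvRunMap k cs ++ uglyRec rest true := by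
  induction cs with
  | nil =>
    intro k rest _ hrest
    match rest, hrest with
    | [], _ => simp [uglyRec, pvRunMap]
    | d :: t, hd =>
      simp only [List.nil_append, pvRunMap, List.nil_append]
      rw [uglyRec_nontok hd, uglyRec_nontok hd]
  | cons c cs ih =>
    intro k rest hall hrest
    have hc : pvTok c = true := hall c (by simp)
    have hall' : ∀ x ∈ cs, pvTok x = true := fun x hx => hall x (by simp [hx])
    have hpar : (!(k % 2 == 0)) = ((k + 1) % 2 == 0) := by
      rcases Nat.mod_two_eq_zero_or_one k with h | h <;> simp [h, Nat.add_mod]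
    by_cases ha : PySem.Chars.isalpha c = true
    · simp only [List.cons_append, uglyRec, ha, if_true, pvRunMap]
      rw [hpar, ih (k + 1) rest hall' hrest]
    · have hsp : c = ' ' := by
        simp only [pvTok, Bool.or_eq_true, beq_iff_eq] at hc
        tauto
      subst hsp
      simp only [List.cons_append, uglyRec, pvRunMap, if_neg ha,
        if_neg (show ¬(' ' = '-') by decide)]
      rw [hpar, ih (k + 1) rest hall' hrest]
      simp

theorem dropWhile_head_nontok (p : Char → Bool) (l : List Char) :
    (match l.dropWhile p with | [] => True | d :: _ => p d = false) := by
  induction l with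
  | nil => simp [List.dropWhile]
  | cons c rest ih =>
    by_cases h : p c
    · simpa [List.dropWhile_cons, h] using ih
    · simp [h]

theorem main_lemma : ∀ (n : Nat) (l : List Char), l.length ≤ n →
    uglyRec l true = pvGroups l := by
  intro n
  induction n with
  | zero =>
    intro l hl
    have : l = [] := List.eq_nil_of_length_eq_zero (Nat.le_zero.mp hl)
    subst this; simp [uglyRec, pvGroups]
  | succ n ih =>
    intro l hl
    match l with
    | [] => simp [uglyRec, pvGroups]
    | c :: rest =>
      by_cases hTok : pvTok c = true
      · have hsplit := List.takeWhile_append_dropWhile (p := pvTok) (l := c :: rest)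
        have htw : ∀ x ∈ (c :: rest).takeWhile pvTok, pvTok x = true :=
          fun x hx => List.mem_takeWhile_imp hx
        have hdw := dropWhile_head_nontok pvTok (c :: rest)
        have hlen : ((c :: rest).dropWhile pvTok).length ≤ n := by
          have : (c :: rest).dropWhile pvTok = rest.dropWhile pvTok := by
            simp [hTok]
          rw [this]
          exact le_trans (List.length_dropWhile_le _ _) (Nat.le_of_succ_le_succ hl)
        calc uglyRec (c :: rest) true
            = uglyRec ((c :: rest).takeWhile pvTok ++ (c :: rest).dropWhile pvTok) (0 % 2 == 0) := by
              rw [hsplit]; rfl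
          _ = pvRunMap 0 ((c :: rest).takeWhile pvTok) ++ uglyRec ((c :: rest).dropWhile pvTok) true :=
              run_lemma _ 0 _ htw hdw
          _ = pvRunMap 0 ((c :: rest).takeWhile pvTok) ++ pvGroups ((c :: rest).dropWhile pvTok) := by
              rw [ih _ hlen]
          _ = pvGroups (c :: rest) := by simp only [pvGroups]; simp [hTok]
      · rw [uglyRec_nontok (eq_false_of_ne_true hTok) rest true]
        simp only [pvGroups]
        simp [hTok]
        rw [ih rest (Nat.le_of_succ_le_succ hl)]

-- ===== VERDICT (by name: the statement is the Claim_ definition above) =====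
theorem uglify_word_spec : Claim_equal_uglify_word := by
  intro s _
  unfold Spec_uglify_word uglify_word uglify_word_alt
  rw [foldA_eq s.toList true []]
  rw [main_lemma s.toList.length s.toList le_rfl]
  rfl
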